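-- pv_equiv track=rewrite | github.com/alwdhaieufna/llm_ner | finetune.py | find_first_index
-- ===== SOURCE A (Python) =====
-- def find_first_index(A, B):
--   B = B[:]
--   for i, x in enumerate(A):
--     if x == B[0]:
--       B.pop(0)
--       if not B:
--         return i
--   return -1
-- ===== SOURCE B (Python) =====
-- def find_first_index(A, B):
--   pos = -1
--   for b in B:
--     try:
--       pos = A.index(b, pos + 1)
--     except ValueError:
--       return -1
--   return pos
-- ===== Notes on version B (the rewrite author's own statement) =====
-- stated objective: faster
-- what changed: iterates over B, locating each element with list.index starting after the previous match, instead of scanning A element-by-element against a pop(0)-mutated copy of B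
import Mathlib
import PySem

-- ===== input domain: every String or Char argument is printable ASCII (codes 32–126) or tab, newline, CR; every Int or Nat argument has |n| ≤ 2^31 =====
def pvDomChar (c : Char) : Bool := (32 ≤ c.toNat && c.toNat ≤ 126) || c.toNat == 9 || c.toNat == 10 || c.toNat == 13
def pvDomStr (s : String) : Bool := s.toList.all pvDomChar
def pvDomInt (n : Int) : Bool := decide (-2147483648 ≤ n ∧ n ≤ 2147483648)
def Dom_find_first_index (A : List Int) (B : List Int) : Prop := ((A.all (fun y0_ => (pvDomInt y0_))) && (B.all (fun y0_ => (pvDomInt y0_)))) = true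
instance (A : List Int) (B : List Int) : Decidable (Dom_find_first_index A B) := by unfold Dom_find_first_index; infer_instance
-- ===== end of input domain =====

-- B iterates over B's elements, finding each with list.index after the previous match,
-- instead of A's element-by-element scan of A against a pop(0)-mutated copy of B.

-- ===== PORT A =====
-- loop over A with index i and the mutated remaining list `rem` (the working copy of B);
-- `rem.head? = some x` is Python's `x == B[0]` (on rem = [] Python raises IndexError — excluded by Pre_).
def find_first_index_goA (rem : List Int) : List Int → Int → Int
  | [], _ => -1
  | x :: xs, i =>
    if rem.head? = some x then
      (if rem.tail = [] then i else find_first_index_goA rem.tail xs (i + 1))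
    else find_first_index_goA rem xs (i + 1)

def find_first_index (A : List Int) (B : List Int) : Int :=
  find_first_index_goA B A 0

-- ===== PORT B =====
-- loop over B carrying `pos`; Python's `A.index(b, pos + 1)` (ValueError → return -1) is
-- the stdlib search ported as idxOf? on the suffix A.drop (pos+1); pos+1 ≥ 0 always, so toNat is exact.
def find_first_index_goB (A : List Int) : List Int → Int → Int
  | [], pos => pos
  | b :: bs, pos =>
    match (A.drop (pos + 1).toNat).idxOf? b with
    | none => -1
    | some k => find_first_index_goB A bs (pos + 1 + (k : Int))

def find_first_index_alt (A : List Int) (B : List Int) : Int :=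
  find_first_index_goB A B (-1)

-- ===== PRECONDITION & SPEC =====
-- Pre_ excludes exactly the inputs where A raises IndexError (B[0] on empty B): B empty while A is non-empty.
def Pre_find_first_index (A : List Int) (B : List Int) : Prop := A = [] ∨ B ≠ []
instance (A : List Int) (B : List Int) : Decidable (Pre_find_first_index A B) := by unfold Pre_find_first_index; infer_instance
def pvWitness_find_first_index : List Int × List Int := ([1, 2, 3], [2, 3])

def Spec_find_first_index (A : List Int) (B : List Int) (out : Int) : Prop := out = find_first_index_alt A B
instance (A : List Int) (B : List Int) (out : Int) : Decidable (Spec_find_first_index A B out) := by unfold Spec_find_first_index; infer_instance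

-- ===== CLAIM (what is proved, stated in full; the proofs are below) =====
def Claim_equal_find_first_index : Prop := ∀ (A : List Int) (B : List Int), Dom_find_first_index A B → Pre_find_first_index A B → Spec_find_first_index A B (find_first_index A B)

-- ===== LEMMAS AND PROOFS =====

-- A's scan of As against b::bs, characterised by the first occurrence of b in As
theorem goA_idxOf (b : Int) (bs : List Int) :
    ∀ (As : List Int) (i : Int),
      find_first_index_goA (b :: bs) As i =
        match As.idxOf? b with
        | none => -1
        | some k => if bs = [] then i + (k : Int)
                    else find_first_index_goA bs (As.drop (k + 1)) (i + (k : Int) + 1) := by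
  intro As
  induction As with
  | nil => intro i; rfl
  | cons x xs ih =>
    intro i
    simp only [find_first_index_goA, List.head?_cons, List.tail_cons, List.idxOf?_cons]
    by_cases hx : b = x
    · subst hx
      simp only [BEq.rfl, if_pos]
      by_cases hbs : bs = []
      · simp [hbs]
      · simp [hbs]
    · have hne : ¬ ((some b : Option Int) = some x) := by simp [hx]
      have hbeq : (x == b) = false := by simp [Ne.symm hx]
      simp only [if_neg hne, hbeq, if_neg Bool.false_ne_true, ih (i + 1)]
      cases hk : xs.idxOf? b with
      | none => simp
      | some k =>
        simp only [Option.map_some]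
        have h1 : i + 1 + (k : Int) = i + ((k + 1 : Nat) : Int) := by push_cast; ring
        have h2 : i + 1 + (k : Int) + 1 = i + ((k + 1 : Nat) : Int) + 1 := by push_cast; ring
        simp [h1]

-- main bridge: A's scan of the suffix A.drop s equals B's loop at pos = s - 1
theorem goA_eq_goB (A : List Int) :
    ∀ (bs : List Int) (b : Int) (s : Nat),
      find_first_index_goA (b :: bs) (A.drop s) (s : Int) =
        find_first_index_goB A (b :: bs) ((s : Int) - 1) := by
  intro bs
  induction bs with
  | nil =>
    intro b s
    rw [goA_idxOf]
    simp only [find_first_index_goB]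
    have hs : ((s : Int) - 1 + 1).toNat = s := by omega
    rw [hs]
    cases hk : (A.drop s).idxOf? b with
    | none => simp
    | some k =>
      simp
  | cons b' bs' ih =>
    intro b s
    rw [goA_idxOf]
    simp only [find_first_index_goB]
    have hs : ((s : Int) - 1 + 1).toNat = s := by omega
    rw [hs]
    cases hk : (A.drop s).idxOf? b with
    | none => simp
    | some k =>
      simp only [List.cons_ne_nil]
      have hdrop : (A.drop s).drop (k + 1) = A.drop (s + (k + 1)) := by
        rw [List.drop_drop]
      have hi : (s : Int) + (k : Int) + 1 = ((s + (k + 1) : Nat) : Int) := by push_cast; ring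
      have hpos : (s : Int) - 1 + 1 + (k : Int) = ((s + (k + 1) : Nat) : Int) - 1 := by push_cast; ring
      rw [hdrop, hi, hpos]
      exact ih b' (s + (k + 1))

theorem find_first_index_eq_alt (A B : List Int) (h : Pre_find_first_index A B) :
    find_first_index A B = find_first_index_alt A B := by
  rcases h with h | h
  · subst h
    cases B with
    | nil => rfl
    | cons b bs =>
      simp only [find_first_index, find_first_index_alt, find_first_index_goA,
        find_first_index_goB]
      cases bs <;> rfl
  · cases B with
    | nil => exact absurd rfl h
    | cons b bs =>
      have := goA_eq_goB A bs b 0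
      simpa [find_first_index, find_first_index_alt] using this

-- ===== VERDICT (by name: the statement is the Claim_ definition above) =====
theorem find_first_index_spec : Claim_equal_find_first_index := by
  intro A B _ hpre
  exact find_first_index_eq_alt A B hpre
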